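-- pv_equiv track=rewrite | github.com/koehnden/dragon-lens | src/services/extraction/consultant.py | _merge_validation_results
-- ===== SOURCE A (Python) =====
-- def _merge_validation_results(
--     results: list[tuple[set[str], set[str], set[str], set[str], dict[str, str]]],
-- ) -> tuple[set[str], set[str], set[str], set[str], dict[str, str]]:
--     v_brands, v_products, r_brands, r_products, reasons = set(), set(), set(), set(), {}
--     for vb, vp, rb, rp, r in results:
--         v_brands.update(vb)
--         v_products.update(vp)
--         r_brands.update(rb)
--         r_products.update(rp)
--         reasons.update(r)
--     return v_brands, v_products, r_brands, r_products, reasons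
-- ===== SOURCE B (Python) =====
-- def _merge_validation_results(
--     results: list[tuple[set[str], set[str], set[str], set[str], dict[str, str]]],
-- ) -> tuple[set[str], set[str], set[str], set[str], dict[str, str]]:
--     # Divide-and-conquer reduction: split the rows in half, merge each half
--     # recursively, then combine the two partial merges field by field.
--     n = len(results)
--     if n == 0:
--         return set(), set(), set(), set(), {}
--     if n == 1:
--         vb, vp, rb, rp, r = results[0]
--         return set(vb), set(vp), set(rb), set(rp), dict(r)
--     l = _merge_validation_results(results[: n // 2])
--     r = _merge_validation_results(results[n // 2 :])
--     return l[0] | r[0], l[1] | r[1], l[2] | r[2], l[3] | r[3], {**l[4], **r[4]}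
-- ===== Notes on version B (the rewrite author's own statement) =====
-- stated objective: alternative
-- what changed: Replaces A's single left-to-right loop mutating five accumulators with a divide-and-conquer reduction: the row list is split in half, each half is merged recursively, and the two partial results are combined field-wise with set union and dict merge; correctness rests on associativity of those combining operators.
import Mathlib
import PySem

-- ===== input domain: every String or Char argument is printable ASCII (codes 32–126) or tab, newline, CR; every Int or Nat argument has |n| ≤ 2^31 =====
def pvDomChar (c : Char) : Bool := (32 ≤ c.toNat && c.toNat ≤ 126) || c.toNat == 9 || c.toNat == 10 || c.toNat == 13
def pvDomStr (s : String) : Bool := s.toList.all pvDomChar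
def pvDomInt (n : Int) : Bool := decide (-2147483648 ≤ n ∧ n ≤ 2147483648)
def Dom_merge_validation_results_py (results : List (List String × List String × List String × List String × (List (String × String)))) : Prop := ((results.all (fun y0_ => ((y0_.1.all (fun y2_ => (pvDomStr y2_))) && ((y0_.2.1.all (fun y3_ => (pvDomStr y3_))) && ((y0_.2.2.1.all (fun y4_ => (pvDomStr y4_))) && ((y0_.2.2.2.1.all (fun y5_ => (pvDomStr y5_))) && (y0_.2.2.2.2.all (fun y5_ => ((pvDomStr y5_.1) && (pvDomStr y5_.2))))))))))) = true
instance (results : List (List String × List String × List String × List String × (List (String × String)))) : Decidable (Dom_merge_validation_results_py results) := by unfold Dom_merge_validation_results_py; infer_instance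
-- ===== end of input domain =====

-- B replaces A's single left-to-right loop over five mutated accumulators with a
-- divide-and-conquer reduction (recursive halving, field-wise combine by set union
-- and dict merge); same total cost, objective: alternative.

-- ===== PORT A =====
-- literal port of A: one fold over the rows, updating the five accumulators in step
def merge_validation_results_py (results : List (List String × List String × List String × List String × (List (String × String)))) : List String × List String × List String × List String × (List (String × String)) :=
  let st := results.foldl
    (fun st row =>
      (PySem.Set.update st.1 row.1,
       PySem.Set.update st.2.1 row.2.1,
       PySem.Set.update st.2.2.1 row.2.2.1,
       PySem.Set.update st.2.2.2.1 row.2.2.2.1,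
       PySem.Dict.update st.2.2.2.2 row.2.2.2.2))
    ((PySem.Set.empty : PySem.Set String), (PySem.Set.empty : PySem.Set String),
     (PySem.Set.empty : PySem.Set String), (PySem.Set.empty : PySem.Set String),
     (PySem.Dict.empty : PySem.Dict String String))
  (st.1, st.2.1, st.2.2.1, st.2.2.2.1, st.2.2.2.2.items)

-- ===== PORT B =====
-- literal port of B's recursion (the dict stays a PySem.Dict through the recursion,
-- exactly as Python B keeps a dict; the entry point renders it as items).
-- Python's slices results[: n//2] / results[n//2 :] with 0 ≤ n//2 ≤ n are exactly
-- List.take / List.drop (PySem.List.slice_to / slice_from).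
def pvMergeB (results : List (List String × List String × List String × List String × (List (String × String)))) : PySem.Set String × PySem.Set String × PySem.Set String × PySem.Set String × PySem.Dict String String :=
  match results with
  | [] => (PySem.Set.empty, PySem.Set.empty, PySem.Set.empty, PySem.Set.empty, PySem.Dict.empty)
  | [row] =>
    (PySem.Set.ofList row.1, PySem.Set.ofList row.2.1, PySem.Set.ofList row.2.2.1,
     PySem.Set.ofList row.2.2.2.1, PySem.Dict.ofList row.2.2.2.2)
  | a :: b :: t =>
    let results := a :: b :: t
    let l := pvMergeB (results.take (results.length / 2))
    let r := pvMergeB (results.drop (results.length / 2))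
    (PySem.Set.union l.1 r.1, PySem.Set.union l.2.1 r.2.1,
     PySem.Set.union l.2.2.1 r.2.2.1, PySem.Set.union l.2.2.2.1 r.2.2.2.1,
     PySem.Dict.update l.2.2.2.2 r.2.2.2.2.items)
termination_by results.length
decreasing_by
  · simp [List.length_take]; omega
  · simp; omega

def merge_validation_results_py_alt (results : List (List String × List String × List String × List String × (List (String × String)))) : List String × List String × List String × List String × (List (String × String)) :=
  let st := pvMergeB results
  (st.1, st.2.1, st.2.2.1, st.2.2.2.1, st.2.2.2.2.items)

-- ===== PRECONDITION & SPEC =====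
def Spec_merge_validation_results_py (results : List (List String × List String × List String × List String × (List (String × String)))) (out : List String × List String × List String × List String × (List (String × String))) : Prop := out = merge_validation_results_py_alt results
instance (results : List (List String × List String × List String × List String × (List (String × String)))) (out : List String × List String × List String × List String × (List (String × String))) : Decidable (Spec_merge_validation_results_py results out) := by unfold Spec_merge_validation_results_py; infer_instance

-- ===== CLAIM (what is proved, stated in full; the proofs are below) =====
def Claim_equal_merge_validation_results_py : Prop := ∀ (results : List (List String × List String × List String × List String × (List (String × String)))), Dom_merge_validation_results_py results → Spec_merge_validation_results_py results (merge_validation_results_py results)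

-- ===== LEMMAS AND PROOFS =====

-- sets: adding a present element is a no-op
theorem set_add_of_mem {x : String} {s : PySem.Set String} (h : x ∈ s) :
    PySem.Set.add s x = s := by
  simp [PySem.Set.add]
  exact h

-- sets: updating by (add t x) = add after updating by t
theorem set_update_add (s t : PySem.Set String) (x : String) :
    PySem.Set.update s (PySem.Set.add t x) = PySem.Set.add (PySem.Set.update s t) x := by
  by_cases h : x ∈ t
  · rw [set_add_of_mem h, set_add_of_mem ((PySem.Set.mem_update s t x).mpr (Or.inr h))]
  · have hc : t.contains x = false := by
      cases hcc : t.contains x with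
      | true => exact absurd ((PySem.Set.contains_iff t x).mp hcc) h
      | false => rfl
    have hx : PySem.Set.add t x = t ++ [x] := by
      simp [PySem.Set.add]
      exact h
    rw [hx, PySem.Set.update_append]
    rfl

-- sets: updating by a foldl-add chain = updating by the base then the elements
theorem set_update_foldl_add (xs : List String) (t s : PySem.Set String) :
    PySem.Set.update s (xs.foldl PySem.Set.add t)
      = PySem.Set.update (PySem.Set.update s t) xs := by
  induction xs generalizing t s with
  | nil => rfl
  | cons x xs ih =>
    simp only [List.foldl_cons, ih, set_update_add, PySem.Set.update_cons]

-- sets: updating by set(zs) = updating by zs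
theorem set_update_ofList (s : PySem.Set String) (zs : List String) :
    PySem.Set.update s (PySem.Set.ofList zs) = PySem.Set.update s zs := by
  rw [PySem.Set.ofList_eq_foldl, set_update_foldl_add]
  rfl

-- sets: a fold of updates is one update by the concatenation
theorem set_foldl_update_flat (l : List (List String)) (s : PySem.Set String) :
    l.foldl PySem.Set.update s = PySem.Set.update s (l.flatMap id) := by
  induction l generalizing s with
  | nil => rfl
  | cons a l ih =>
    simp only [List.foldl_cons, List.flatMap_cons, id_def]
    rw [ih, PySem.Set.update_append]

-- sets: B's union of two partial folds = A's fold over the concatenation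
theorem set_union_foldl (as bs : List (List String)) :
    PySem.Set.union (as.foldl PySem.Set.update PySem.Set.empty)
                    (bs.foldl PySem.Set.update PySem.Set.empty)
      = (as ++ bs).foldl PySem.Set.update PySem.Set.empty := by
  rw [set_foldl_update_flat bs,
      show PySem.Set.update (PySem.Set.empty) (bs.flatMap id)
           = PySem.Set.ofList (bs.flatMap id) from rfl,
      show PySem.Set.union (as.foldl PySem.Set.update PySem.Set.empty)
             (PySem.Set.ofList (bs.flatMap id))
           = PySem.Set.update (as.foldl PySem.Set.update PySem.Set.empty)
             (PySem.Set.ofList (bs.flatMap id)) from rfl,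
      set_update_ofList, List.foldl_append, set_foldl_update_flat bs]

-- dicts: two inserts at distinct keys commute when the first key is already present
theorem dict_insert_comm (D : PySem.Dict String String) {k q1 : String} (v q2 : String)
    (hk : D.contains k = true) (hne : q1 ≠ k) :
    (D.insert k v).insert q1 q2 = (D.insert q1 q2).insert k v := by
  have hkq : (D.insert q1 q2).contains k = true := by
    simp [PySem.Dict.contains_insert, hk]
  by_cases hq : D.contains q1 = true
  · have hqk : (D.insert k v).contains q1 = true := by
      simp [PySem.Dict.contains_insert, hq]
    apply PySem.Dict.ext
    rw [PySem.Dict.items_insert_of_contains _ q2 hqk,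
        PySem.Dict.items_insert_of_contains _ v hk,
        PySem.Dict.items_insert_of_contains _ v hkq,
        PySem.Dict.items_insert_of_contains _ q2 hq]
    simp only [List.map_map]
    refine List.map_congr_left (fun p _ => ?_)
    by_cases h1 : p.1 = k <;> by_cases h2 : p.1 = q1 <;>
      simp_all [Function.comp, Ne.symm hne]
  · have hq' : D.contains q1 = false := by simpa using hq
    have hqk' : (D.insert k v).contains q1 = false := by
      simp [PySem.Dict.contains_insert, hq', hne]
    apply PySem.Dict.ext
    rw [PySem.Dict.items_insert_of_not_contains _ q2 hqk',
        PySem.Dict.items_insert_of_contains _ v hk,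
        PySem.Dict.items_insert_of_contains _ v hkq,
        PySem.Dict.items_insert_of_not_contains _ q2 hq',
        List.map_append]
    simp [hne]

-- dicts: an insert at a present key not touched by the list commutes out of a fold
theorem dict_foldl_insert_out (l : List (String × String)) (D : PySem.Dict String String)
    (k v : String) (hk : D.contains k = true) (hl : k ∉ l.map Prod.fst) :
    l.foldl (fun (d : PySem.Dict String String) (p : String × String) => d.insert p.1 p.2) (D.insert k v)
      = (l.foldl (fun (d : PySem.Dict String String) (p : String × String) => d.insert p.1 p.2) D).insert k v := by
  induction l generalizing D with
  | nil => rfl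
  | cons q l ih =>
    simp only [List.map_cons, List.mem_cons, not_or] at hl
    simp only [List.foldl_cons]
    rw [dict_insert_comm D v q.2 hk (Ne.symm hl.1),
        ih _ (by simp [PySem.Dict.contains_insert, hk]) hl.2]

-- dicts: folding the in-place-replaced items = folding the originals then inserting
theorem dict_foldl_map_replace (k v : String) (l : List (String × String))
    (hnd : (l.map Prod.fst).Nodup) (hk : k ∈ l.map Prod.fst) (D : PySem.Dict String String) :
    (l.map (fun p => if p.1 == k then (k, v) else p)).foldl (fun (d : PySem.Dict String String) (p : String × String) => d.insert p.1 p.2) D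
      = (l.foldl (fun (d : PySem.Dict String String) (p : String × String) => d.insert p.1 p.2) D).insert k v := by
  induction l generalizing D with
  | nil => simp at hk
  | cons p l ih =>
    obtain ⟨p1, p2⟩ := p
    simp only [List.map_cons, List.nodup_cons] at hnd
    by_cases hpk : p1 = k
    · have hnl : k ∉ l.map Prod.fst := hpk ▸ hnd.1
      have hmapid : l.map (fun p => if p.1 == k then (k, v) else p) = l := by
        have hmc := List.map_congr_left
          (f := fun p : String × String => if p.1 == k then (k, v) else p) (g := id)
          (fun q hq => by
            have hqk : q.1 ≠ k := fun h => hnl (h ▸ List.mem_map.mpr ⟨q, hq, rfl⟩)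
            simp [hqk])
        simpa using hmc
      have hcond : ((p1 : String) == k) = true := by simp [hpk]
      simp only [List.map_cons, List.foldl_cons, hmapid, hcond, if_true]
      rw [hpk]
      rw [← dict_foldl_insert_out l (D.insert k p2) k v
            (by simp) hnl,
          PySem.Dict.insert_insert_self]
    · have hk' : k ∈ l.map Prod.fst := by
        rcases List.mem_cons.mp hk with h | h
        · exact absurd h.symm hpk
        · exact h
      have hcond : ((p1 : String) == k) = false := by simp [hpk]
      simp only [List.map_cons, List.foldl_cons, hcond, Bool.false_eq_true, if_false]
      exact ih hnd.2 hk' _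

-- dicts: folding the items of (E.insert k v) = folding E's items then inserting
theorem dict_foldl_items_insert (E : PySem.Dict String String) (hnd : E.keys.Nodup)
    (k v : String) (D : PySem.Dict String String) :
    (E.insert k v).items.foldl (fun (d : PySem.Dict String String) (p : String × String) => d.insert p.1 p.2) D
      = (E.items.foldl (fun (d : PySem.Dict String String) (p : String × String) => d.insert p.1 p.2) D).insert k v := by
  by_cases h : E.contains k = true
  · rw [PySem.Dict.items_insert_of_contains _ v h]
    exact dict_foldl_map_replace k v E.items hnd
      ((PySem.Dict.contains_iff_mem_keys E k).mp h) D
  · rw [PySem.Dict.items_insert_of_not_contains _ v (by simpa using h), List.foldl_append]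
    rfl

-- dicts: folding a canonicalised item list = folding the raw pairs
theorem dict_foldl_canon (xs : List (String × String)) (D E : PySem.Dict String String)
    (hnd : E.keys.Nodup) :
    (xs.foldl (fun (d : PySem.Dict String String) (p : String × String) => d.insert p.1 p.2) E).items.foldl (fun (d : PySem.Dict String String) (p : String × String) => d.insert p.1 p.2) D
      = xs.foldl (fun (d : PySem.Dict String String) (p : String × String) => d.insert p.1 p.2)
          (E.items.foldl (fun (d : PySem.Dict String String) (p : String × String) => d.insert p.1 p.2) D) := by
  induction xs generalizing D E with
  | nil => rfl
  | cons p xs ih =>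
    simp only [List.foldl_cons]
    rw [ih _ _ (PySem.Dict.nodup_keys_insert _ _ _ hnd),
        dict_foldl_items_insert E hnd p.1 p.2 D]

-- dicts: a fold of dict.update rows = one insert-fold over the concatenated items
theorem dict_foldl_update_flat (l : List (List (String × String))) (D : PySem.Dict String String) :
    l.foldl PySem.Dict.update D = (l.flatMap id).foldl (fun (d : PySem.Dict String String) (p : String × String) => d.insert p.1 p.2) D := by
  induction l generalizing D with
  | nil => rfl
  | cons a l ih =>
    simp only [List.foldl_cons, List.flatMap_cons, id_def]
    rw [ih, List.foldl_append]
    rfl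

-- dicts: B's merge of two partial dicts = A's fold over the concatenation
theorem dict_update_foldl (as bs : List (String × String)) :
    PySem.Dict.update (as.foldl (fun (d : PySem.Dict String String) (p : String × String) => d.insert p.1 p.2) PySem.Dict.empty)
      ((bs.foldl (fun (d : PySem.Dict String String) (p : String × String) => d.insert p.1 p.2) (PySem.Dict.empty : PySem.Dict String String)).items)
      = (as ++ bs).foldl (fun (d : PySem.Dict String String) (p : String × String) => d.insert p.1 p.2) PySem.Dict.empty := by
  show (bs.foldl (fun (d : PySem.Dict String String) (p : String × String) => d.insert p.1 p.2)
        (PySem.Dict.empty : PySem.Dict String String)).items.foldl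
        (fun (d : PySem.Dict String String) (p : String × String) => d.insert p.1 p.2) _ = _
  rw [dict_foldl_canon bs _ PySem.Dict.empty PySem.Dict.nodup_keys_empty, List.foldl_append]
  rfl

-- A's fold over rows with a 5-tuple state, split into the five per-field folds
theorem merge_fold_split
    (results : List (List String × List String × List String × List String × (List (String × String))))
    (s1 s2 s3 s4 : PySem.Set String) (d : PySem.Dict String String) :
    results.foldl
      (fun st row =>
        (PySem.Set.update st.1 row.1,
         PySem.Set.update st.2.1 row.2.1,
         PySem.Set.update st.2.2.1 row.2.2.1,
         PySem.Set.update st.2.2.2.1 row.2.2.2.1,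
         PySem.Dict.update st.2.2.2.2 row.2.2.2.2))
      (s1, s2, s3, s4, d)
    = ((results.map (·.1)).foldl PySem.Set.update s1,
       (results.map (·.2.1)).foldl PySem.Set.update s2,
       (results.map (·.2.2.1)).foldl PySem.Set.update s3,
       (results.map (·.2.2.2.1)).foldl PySem.Set.update s4,
       (results.map (·.2.2.2.2)).foldl PySem.Dict.update d) := by
  induction results generalizing s1 s2 s3 s4 d with
  | nil => rfl
  | cons row rest ih =>
    simp only [List.foldl_cons, List.map_cons, ih]

-- B's recursion computes exactly the five per-field folds of A
theorem pvMergeB_eq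
    (results : List (List String × List String × List String × List String × (List (String × String)))) :
    pvMergeB results
    = ((results.map (·.1)).foldl PySem.Set.update PySem.Set.empty,
       (results.map (·.2.1)).foldl PySem.Set.update PySem.Set.empty,
       (results.map (·.2.2.1)).foldl PySem.Set.update PySem.Set.empty,
       (results.map (·.2.2.2.1)).foldl PySem.Set.update PySem.Set.empty,
       (results.map (·.2.2.2.2)).foldl PySem.Dict.update PySem.Dict.empty) := by
  have aux : ∀ (n : Nat) (rs : List (List String × List String × List String × List String × (List (String × String)))), rs.length ≤ n →
      pvMergeB rs
      = ((rs.map (·.1)).foldl PySem.Set.update PySem.Set.empty,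
         (rs.map (·.2.1)).foldl PySem.Set.update PySem.Set.empty,
         (rs.map (·.2.2.1)).foldl PySem.Set.update PySem.Set.empty,
         (rs.map (·.2.2.2.1)).foldl PySem.Set.update PySem.Set.empty,
         (rs.map (·.2.2.2.2)).foldl PySem.Dict.update PySem.Dict.empty) := by
    intro n
    induction n with
    | zero =>
      intro rs h
      have : rs = [] := List.eq_nil_of_length_eq_zero (Nat.le_zero.mp h)
      subst this
      simp [pvMergeB]
    | succ n ih =>
      intro rs h
      match rs with
      | [] => simp [pvMergeB]
      | [row] =>
        simp [pvMergeB, PySem.Set.update_nil_left]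
        rfl
      | a :: b :: t =>
        have h1 : (List.take ((a :: b :: t).length / 2) (a :: b :: t)).length ≤ n := by
          simp only [List.length_take, List.length_cons]
          simp at h
          omega
        have h2 : (List.drop ((a :: b :: t).length / 2) (a :: b :: t)).length ≤ n := by
          simp only [List.length_drop, List.length_cons]
          simp at h
          omega
        simp only [pvMergeB]
        rw [ih _ h1, ih _ h2]
        rw [set_union_foldl, set_union_foldl, set_union_foldl, set_union_foldl,
            dict_foldl_update_flat, dict_foldl_update_flat, dict_update_foldl,
            ← List.flatMap_append, ← List.map_append, ← List.map_append, ← List.map_append,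
            ← List.map_append, ← List.map_append, List.take_append_drop,
            ← dict_foldl_update_flat]
  exact aux results.length results le_rfl

-- ===== VERDICT (by name: the statement is the Claim_ definition above) =====
theorem merge_validation_results_py_spec : Claim_equal_merge_validation_results_py := by
  intro results _
  unfold Spec_merge_validation_results_py merge_validation_results_py merge_validation_results_py_alt
  rw [pvMergeB_eq, merge_fold_split]
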